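-- pv_equiv track=rewrite | github.com/karim23657/Subtr | subtr/subtr.py | grouping_json_subtitle
-- ===== SOURCE A (Python) =====
-- def grouping_json_subtitle(_captions: list) -> list:
--     stop_list = (".", "!", "?")
--     result = []
--     templist = []
--     for caption in _captions:
--         caption['text'] = str(caption['text']).replace("\n", " ")
--         if str(caption['text']).strip().endswith(stop_list):
--           templist.append(caption)
--           result.append(templist)
--           templist = []
--         else:
--             templist.append(caption)
--     return result
-- ===== SOURCE B (Python) =====
-- def grouping_json_subtitle(_captions: list) -> list:
--     # pass 1: normalise every caption text in place and record boundary indices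
--     boundaries = []
--     for i, caption in enumerate(_captions):
--         caption['text'] = str(caption['text']).replace("\n", " ")
--         if str(caption['text']).strip().endswith((".", "!", "?")):
--             boundaries.append(i)
--     # pass 2: cut the caption list at the boundaries
--     result = []
--     prev = 0
--     for b in boundaries:
--         result.append(_captions[prev:b + 1])
--         prev = b + 1
--     return result
-- ===== Notes on version B (the rewrite author's own statement) =====
-- stated objective: alternative
-- what changed: B replaces A's single pass carrying a running templist accumulator with two passes: first normalise texts and record the indices of sentence-ending captions, then build the groups by slicing the caption list between consecutive boundaries.
import Mathlib
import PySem

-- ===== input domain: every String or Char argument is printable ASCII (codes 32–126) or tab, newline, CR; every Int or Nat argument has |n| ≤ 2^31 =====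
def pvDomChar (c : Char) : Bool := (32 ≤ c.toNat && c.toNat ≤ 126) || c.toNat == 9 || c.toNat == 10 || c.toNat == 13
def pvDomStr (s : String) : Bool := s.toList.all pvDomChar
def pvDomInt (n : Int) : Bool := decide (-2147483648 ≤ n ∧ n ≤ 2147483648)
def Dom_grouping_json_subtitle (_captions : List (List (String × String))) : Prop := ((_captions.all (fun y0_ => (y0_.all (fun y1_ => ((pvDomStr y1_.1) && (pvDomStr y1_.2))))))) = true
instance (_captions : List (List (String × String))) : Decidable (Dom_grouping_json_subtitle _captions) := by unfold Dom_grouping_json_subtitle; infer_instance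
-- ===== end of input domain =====

-- B differs from A by decomposition: A builds the groups in one pass with a running templist;
-- B first normalises the texts and records boundary indices, then slices the list at them.
-- Both Pythons mutate each caption dict in place identically; the theorems are about the return value.

-- ===== PORT A =====
-- caption['text'] = str(caption['text']).replace("\n", " ")  (dict update in place; both Pythons run this line)
def pvUpd (caption : List (String × String)) : List (String × String) :=
  ((PySem.Dict.mk caption).insert "text"
    (PySem.Str.replace ((PySem.Dict.mk caption).getD "text" "") "\n" " ")).items

-- str(caption['text']).strip().endswith((".", "!", "?"))  (tuple endswith = disjunction; both Pythons run this test)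
def pvStop (caption : List (String × String)) : Bool :=
  let s := PySem.Str.strip ((PySem.Dict.mk caption).getD "text" "")
  PySem.Str.endswith s "." || PySem.Str.endswith s "!" || PySem.Str.endswith s "?"

def grouping_json_subtitle (_captions : List (List (String × String))) : List (List (List (String × String))) :=
  (_captions.foldl
    (fun st caption =>
      let c := pvUpd caption
      if pvStop c then (st.1 ++ [st.2 ++ [c]], ([] : List (List (String × String))))
      else (st.1, st.2 ++ [c]))
    ([], [])).1

-- ===== PORT B =====
def grouping_json_subtitle_alt (_captions : List (List (String × String))) : List (List (List (String × String))) :=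
  -- pass 1: mutate every caption's text and record boundary indices
  let cs := _captions.map pvUpd
  let boundaries := (PySem.List.enumerate cs 0).foldl
    (fun bs p => if pvStop p.2 then bs ++ [p.1] else bs) ([] : List Int)
  -- pass 2: slice the (mutated) caption list at the boundaries
  (boundaries.foldl
    (fun st b => (st.1 ++ [PySem.List.slice cs (some st.2) (some (b + 1))], b + 1))
    (([] : List (List (List (String × String)))), (0 : Int))).1

-- ===== PRECONDITION & SPEC =====
-- Pre_ excludes exactly the inputs where a caption dict has no 'text' key: there Python A (and B) raises KeyError.
def Pre_grouping_json_subtitle (_captions : List (List (String × String))) : Prop :=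
  ∀ c ∈ _captions, (PySem.Dict.mk c).contains "text" = true
instance (_captions : List (List (String × String))) : Decidable (Pre_grouping_json_subtitle _captions) := by unfold Pre_grouping_json_subtitle; infer_instance
def pvWitness_grouping_json_subtitle : (List (List (String × String))) :=
  [[("text", "Hi\nthere.")], [("text", "no end")], [("text", "ok!")]]

def Spec_grouping_json_subtitle (_captions : List (List (String × String))) (out : List (List (List (String × String)))) : Prop := out = grouping_json_subtitle_alt _captions
instance (_captions : List (List (String × String))) (out : List (List (List (String × String)))) : Decidable (Spec_grouping_json_subtitle _captions out) := by unfold Spec_grouping_json_subtitle; infer_instance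

-- ===== CLAIM (what is proved, stated in full; the proofs are below) =====
def Claim_equal_grouping_json_subtitle : Prop := ∀ (_captions : List (List (String × String))), Dom_grouping_json_subtitle _captions → Pre_grouping_json_subtitle _captions → Spec_grouping_json_subtitle _captions (grouping_json_subtitle _captions)

-- ===== LEMMAS AND PROOFS =====

-- the groups A produces from a pending templist `temp` and remaining (already updated) captions
def pvGr (temp : List (List (String × String))) :
    List (List (String × String)) → List (List (List (String × String)))
  | [] => []
  | d :: ds => if pvStop d then (temp ++ [d]) :: pvGr [] ds else pvGr (temp ++ [d]) ds

-- boundary positions (as Nat offsets) in an updated caption list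
def pvBnd : List (List (String × String)) → List Nat
  | [] => []
  | d :: ds => if pvStop d then 0 :: (pvBnd ds).map (· + 1) else (pvBnd ds).map (· + 1)

-- B's second loop as a function of the boundary list
def pvSl (cs : List (List (String × String))) (prev : Int) :
    List Int → List (List (List (String × String)))
  | [] => []
  | b :: bs => PySem.List.slice cs (some prev) (some (b + 1)) :: pvSl cs (b + 1) bs

theorem pvA_foldl (xs : List (List (String × String)))
    (res : List (List (List (String × String)))) (temp : List (List (String × String))) :
    (xs.foldl
      (fun st caption =>
        let c := pvUpd caption
        if pvStop c then (st.1 ++ [st.2 ++ [c]], ([] : List (List (String × String))))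
        else (st.1, st.2 ++ [c]))
      (res, temp)).1 = res ++ pvGr temp (xs.map pvUpd) := by
  induction xs generalizing res temp with
  | nil => simp [pvGr]
  | cons x xs ih =>
    simp only [List.foldl_cons, List.map_cons, pvGr]
    by_cases h : pvStop (pvUpd x) = true
    · simp [h, ih]
    · simp [h, ih]

theorem pvMapShift (s : Int) (t : List Nat) :
    List.map ((fun n => s + Int.ofNat n) ∘ fun x => x + 1) t
      = List.map (fun n => s + 1 + Int.ofNat n) t := by
  apply List.map_congr_left; intro n _
  simp only [Function.comp_apply, Int.ofNat_eq_natCast]; push_cast; ring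

theorem pvB_bnd (cs : List (List (String × String))) (s : Int) (acc : List Int) :
    (PySem.List.enumerate cs s).foldl
      (fun bs p => if pvStop p.2 then bs ++ [p.1] else bs) acc
      = acc ++ (pvBnd cs).map (fun n => s + Int.ofNat n) := by
  induction cs generalizing s acc with
  | nil => simp [PySem.List.enumerate_nil, pvBnd]
  | cons d ds ih =>
    rw [PySem.List.enumerate_cons]
    cases h : pvStop d with
    | true =>
      simp only [List.foldl_cons, pvBnd, h, if_true, ih, List.map_cons, List.map_map,
        List.append_assoc, List.singleton_append]
      rw [show s + Int.ofNat 0 = s by simp, pvMapShift s (pvBnd ds)]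
    | false =>
      simp only [List.foldl_cons, pvBnd, h, Bool.false_eq_true, if_false, ih, List.map_map]
      rw [pvMapShift s (pvBnd ds)]

theorem pvB_foldl (bs : List Int) (cs : List (List (String × String)))
    (res : List (List (List (String × String)))) (prev : Int) :
    (bs.foldl
      (fun st b => (st.1 ++ [PySem.List.slice cs (some st.2) (some (b + 1))], b + 1))
      (res, prev)).1 = res ++ pvSl cs prev bs := by
  induction bs generalizing res prev with
  | nil => simp [pvSl]
  | cons b bs ih => simp [pvSl, ih]

theorem pvTake_len_one (temp ds : List (List (String × String))) (d : List (String × String)) :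
    (temp ++ d :: ds).take (temp.length + 1) = temp ++ [d] := by
  induction temp with
  | nil => simp
  | cons t ts ih => simp [ih]

-- the heart of the equivalence: A's templist grouping = B's slicing at the boundaries
-- (`pre` = captions already consumed into finished groups, `temp` = A's pending templist)
theorem pvMain (ds : List (List (String × String)))
    (temp pre : List (List (String × String))) :
    pvGr temp ds
      = pvSl (pre ++ temp ++ ds) ((pre.length : Nat) : Int)
          ((pvBnd ds).map (fun n => ((pre.length + temp.length + n : Nat) : Int))) := by
  induction ds generalizing temp pre with
  | nil => simp [pvGr, pvBnd, pvSl]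
  | cons d ds ih =>
    cases h : pvStop d with
    | true =>
      simp only [pvGr, pvBnd, h, if_true, List.map_cons, List.map_map, pvSl]
      have hsl : PySem.List.slice (pre ++ temp ++ d :: ds) (some ((pre.length : Nat) : Int))
          (some (((pre.length + temp.length + 0 : Nat) : Int) + 1)) = temp ++ [d] := by
        rw [show ((pre.length + temp.length + 0 : Nat) : Int) + 1
            = ((pre.length + temp.length + 1 : Nat) : Int) from by push_cast; ring]
        rw [PySem.List.slice_natCast, List.append_assoc, List.drop_left]
        rw [show pre.length + temp.length + 1 - pre.length = temp.length + 1 from by omega]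
        exact pvTake_len_one temp ds d
      have hih := ih [] (pre ++ temp ++ [d])
      rw [show pre ++ temp ++ [d] ++ [] ++ ds = pre ++ temp ++ d :: ds from by simp] at hih
      have e1 : ((pre.length + temp.length + 0 : Nat) : Int) + 1
          = (((pre ++ temp ++ [d]).length : Nat) : Int) := by
        simp only [List.length_append, List.length_cons, List.length_nil]; omega
      have e2 : List.map ((fun n => ((pre.length + temp.length + n : Nat) : Int)) ∘ fun x => x + 1) (pvBnd ds)
          = List.map (fun n => (((pre ++ temp ++ [d]).length + ([] : List (List (String × String))).length + n : Nat) : Int)) (pvBnd ds) := by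
        apply List.map_congr_left; intro n _
        simp only [Function.comp_apply, List.length_append, List.length_cons, List.length_nil]
        omega
      rw [hsl, e1, e2, ← hih]
    | false =>
      simp only [pvGr, pvBnd, h, Bool.false_eq_true, if_false, List.map_map]
      have hih := ih (temp ++ [d]) pre
      rw [show pre ++ (temp ++ [d]) ++ ds = pre ++ temp ++ d :: ds from by simp] at hih
      rw [hih]
      have e3 : List.map (fun n => ((pre.length + (temp ++ [d]).length + n : Nat) : Int)) (pvBnd ds)
          = List.map ((fun n => ((pre.length + temp.length + n : Nat) : Int)) ∘ fun x => x + 1) (pvBnd ds) := by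
        apply List.map_congr_left; intro n _
        simp only [Function.comp_apply, List.length_append, List.length_cons, List.length_nil]
        omega
      rw [e3]

-- ===== VERDICT (by name: the statement is the Claim_ definition above) =====
theorem grouping_json_subtitle_spec : Claim_equal_grouping_json_subtitle := by
  intro cs _ _
  unfold Spec_grouping_json_subtitle grouping_json_subtitle grouping_json_subtitle_alt
  simp only []
  rw [pvA_foldl, pvB_bnd, pvB_foldl]
  have hm := pvMain (cs.map pvUpd) [] []
  simp only [List.nil_append, List.length_nil, Nat.cast_zero, Nat.zero_add] at hm
  have e : List.map (fun n => ((n : Nat) : Int)) (pvBnd (cs.map pvUpd))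
      = List.map (fun n => 0 + Int.ofNat n) (pvBnd (cs.map pvUpd)) := by
    apply List.map_congr_left; intro n _; simp
  rw [List.nil_append, List.nil_append, hm, e, List.nil_append]
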